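-- pv_equiv track=rewrite | github.com/jokh38/ptn_checker | src/report_generator.py | _layer_flag_codes
-- ===== SOURCE A (Python) =====
-- def _layer_flag_codes(flag_rows, num_layers):
--     """Collapse multiple binary flag rows into one prioritized abbreviation."""
--     if num_layers <= 0:
--         return [], []
--
--     priority = [
--         ("Fail", "FAIL", 4, "#e74c3c"),
--         ("Settle", "NS", 3, "#f39c12"),
--         ("Overlap", "OV", 2, "#f1c40f"),
--         ("Fallback", "FB", 1, "#5d6d7e"),
--     ]
--     codes = []
--     values = []
--     for layer_idx in range(num_layers):
--         selected_code = ""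
--         selected_value = 0
--         for row_name, code, value, _color in priority:
--             row = flag_rows.get(row_name) if flag_rows else None
--             if row is not None and layer_idx < len(row) and bool(row[layer_idx]):
--                 selected_code = code
--                 selected_value = value
--                 break
--         codes.append(selected_code)
--         values.append(selected_value)
--     return codes, values
-- ===== SOURCE B (Python) =====
-- def _layer_flag_codes(flag_rows, num_layers):
--     """Collapse multiple binary flag rows into one prioritized abbreviation.
--
--     Different decomposition: allocate the result arrays up front, then sweep the
--     priority table lowest-priority first, overwriting per-layer slots; the
--     highest-priority flag is written last and therefore wins.
--     """
--     if num_layers <= 0: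
--         return [], []
--     codes = [""] * num_layers
--     values = [0] * num_layers
--     if flag_rows:
--         for row_name, code, value in (
--             ("Fallback", "FB", 1),
--             ("Overlap", "OV", 2),
--             ("Settle", "NS", 3),
--             ("Fail", "FAIL", 4),
--         ):
--             row = flag_rows.get(row_name)
--             if row is None:
--                 continue
--             for layer_idx in range(min(len(row), num_layers)):
--                 if row[layer_idx]:
--                     codes[layer_idx] = code
--                     values[layer_idx] = value
--     return codes, values
-- ===== Notes on version B (the rewrite author's own statement) =====
-- stated objective: alternative
-- what changed: Replaced the per-layer scan over the priority table with first-match break by preallocated result arrays overwritten in one sweep per flag row, lowest priority first so the highest-priority flag wins by being written last.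
import Mathlib
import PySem

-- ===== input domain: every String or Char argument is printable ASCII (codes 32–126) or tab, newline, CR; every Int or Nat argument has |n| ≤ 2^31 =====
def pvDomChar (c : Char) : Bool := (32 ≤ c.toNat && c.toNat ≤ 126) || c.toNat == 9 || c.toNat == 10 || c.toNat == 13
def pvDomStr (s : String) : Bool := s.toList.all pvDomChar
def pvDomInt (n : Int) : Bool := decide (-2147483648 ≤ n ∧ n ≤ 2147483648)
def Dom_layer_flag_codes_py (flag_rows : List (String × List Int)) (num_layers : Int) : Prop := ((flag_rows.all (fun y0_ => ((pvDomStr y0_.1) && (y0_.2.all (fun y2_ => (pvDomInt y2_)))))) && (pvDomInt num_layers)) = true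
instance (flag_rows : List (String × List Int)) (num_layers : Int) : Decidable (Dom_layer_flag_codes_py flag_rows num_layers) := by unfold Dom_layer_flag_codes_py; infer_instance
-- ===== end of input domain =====

-- B overwrites preallocated result arrays in reverse-priority order instead of A's per-layer scan with break; same cost, alternative decomposition.

-- ===== PORT A =====
-- dict.get on an association list: first match (exact for Python dicts, whose keys are unique)
def dget (fr : List (String × List Int)) (k : String) : Option (List Int) :=
  match fr with
  | [] => none
  | (k', v) :: rest => if k' = k then some v else dget rest k

-- inner 'for row_name, code, value, _color in priority' loop with break → structural recursion
def aSelect (flag_rows : List (String × List Int)) (layer_idx : Int) :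
    List (String × String × Int × String) → String × Int
  | [] => ("", 0)
  | (row_name, code, value, _color) :: rest =>
    let row := if flag_rows ≠ [] then dget flag_rows row_name else none
    match row with
    | some r =>
      if layer_idx < (r.length : Int) ∧ PySem.List.pyGetD r layer_idx 0 ≠ 0 then
        (code, value)
      else aSelect flag_rows layer_idx rest
    | none => aSelect flag_rows layer_idx rest

def layer_flag_codes_py (flag_rows : List (String × List Int)) (num_layers : Int) :
    List String × List Int :=
  if num_layers ≤ 0 then ([], [])
  else
    let priority : List (String × String × Int × String) :=
      [("Fail", "FAIL", 4, "#e74c3c"), ("Settle", "NS", 3, "#f39c12"),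
       ("Overlap", "OV", 2, "#f1c40f"), ("Fallback", "FB", 1, "#5d6d7e")]
    (PySem.List.pyRange 0 num_layers 1).foldl
      (fun (acc : List String × List Int) layer_idx =>
        let sel := aSelect flag_rows layer_idx priority
        (acc.1 ++ [sel.1], acc.2 ++ [sel.2])) ([], [])

-- ===== PORT B =====
-- one overwrite pass for a single flag row ('for layer_idx in range(min(len(row), num_layers))')
def bPass (num_layers : Int) (code : String) (value : Int) (row : List Int)
    (acc : List String × List Int) : List String × List Int :=
  (PySem.List.pyRange 0 (min (row.length : Int) num_layers) 1).foldl
    (fun acc2 layer_idx =>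
      if PySem.List.pyGetD row layer_idx 0 ≠ 0 then
        (PySem.List.pySetD acc2.1 layer_idx code, PySem.List.pySetD acc2.2 layer_idx value)
      else acc2) acc

def layer_flag_codes_py_alt (flag_rows : List (String × List Int)) (num_layers : Int) :
    List String × List Int :=
  if num_layers ≤ 0 then ([], [])
  else
    let init : List String × List Int :=
      (List.replicate num_layers.toNat "", List.replicate num_layers.toNat 0)
    if flag_rows ≠ [] then
      [("Fallback", "FB", (1 : Int)), ("Overlap", "OV", 2),
       ("Settle", "NS", 3), ("Fail", "FAIL", 4)].foldl
        (fun acc entry =>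
          match dget flag_rows entry.1 with
          | none => acc
          | some row => bPass num_layers entry.2.1 entry.2.2 row acc) init
    else init

-- ===== PRECONDITION & SPEC =====
def Spec_layer_flag_codes_py (flag_rows : List (String × List Int)) (num_layers : Int) (out : List String × List Int) : Prop := out = layer_flag_codes_py_alt flag_rows num_layers
instance (flag_rows : List (String × List Int)) (num_layers : Int) (out : List String × List Int) : Decidable (Spec_layer_flag_codes_py flag_rows num_layers out) := by unfold Spec_layer_flag_codes_py; infer_instance

-- ===== CLAIM (what is proved, stated in full; the proofs are below) =====
def Claim_equal_layer_flag_codes_py : Prop := ∀ (flag_rows : List (String × List Int)) (num_layers : Int), Dom_layer_flag_codes_py flag_rows num_layers → Spec_layer_flag_codes_py flag_rows num_layers (layer_flag_codes_py flag_rows num_layers)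

-- ===== LEMMAS AND PROOFS =====

-- whether flag row `name` fires at layer j
def hitO (row? : Option (List Int)) (j : Nat) : Bool :=
  match row? with
  | some r => decide (j < r.length) && (r.getD j 0 != 0)
  | none => false

def hitB (fr : List (String × List Int)) (name : String) (j : Nat) : Bool :=
  hitO (dget fr name) j

def selC (fr : List (String × List Int)) (j : Nat) : String :=
  if hitB fr "Fail" j then "FAIL"
  else if hitB fr "Settle" j then "NS"
  else if hitB fr "Overlap" j then "OV"
  else if hitB fr "Fallback" j then "FB"
  else ""

def selV (fr : List (String × List Int)) (j : Nat) : Int :=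
  if hitB fr "Fail" j then 4
  else if hitB fr "Settle" j then 3
  else if hitB fr "Overlap" j then 2
  else if hitB fr "Fallback" j then 1
  else 0

lemma guard_get (fr : List (String × List Int)) (nm : String) :
    (if fr ≠ [] then dget fr nm else none) = dget fr nm := by
  by_cases h : fr = [] <;> simp [h, dget]

lemma matchStep (row? : Option (List Int)) (j : Nat) (cv rest : String × Int) :
    (match row? with
     | some r =>
       if (j : Int) < (r.length : Int) ∧ PySem.List.pyGetD r (j : Int) 0 ≠ 0 then cv
       else rest
     | none => rest)
    = if hitO row? j then cv else rest := by
  rcases row? with _ | r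
  · simp [hitO]
  · simp only [hitO]
    by_cases h1 : (j : Int) < (r.length : Int) ∧ PySem.List.pyGetD r (j : Int) 0 ≠ 0
    · rw [if_pos h1, if_pos]
      obtain ⟨a, b⟩ := h1
      rw [PySem.List.pyGetD_natCast] at b
      simp only [Bool.and_eq_true, decide_eq_true_eq, bne_iff_ne]
      exact ⟨by exact_mod_cast a, b⟩
    · rw [if_neg h1, if_neg]
      intro hc
      simp only [Bool.and_eq_true, decide_eq_true_eq, bne_iff_ne] at hc
      exact h1 ⟨by exact_mod_cast hc.1, by rw [PySem.List.pyGetD_natCast]; exact hc.2⟩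

lemma aSelect_eq (fr : List (String × List Int)) (j : Nat) :
    aSelect fr (j : Int)
      [("Fail", "FAIL", 4, "#e74c3c"), ("Settle", "NS", 3, "#f39c12"),
       ("Overlap", "OV", 2, "#f1c40f"), ("Fallback", "FB", 1, "#5d6d7e")]
    = (selC fr j, selV fr j) := by
  simp only [aSelect, guard_get, matchStep, selC, selV, hitB]
  split_ifs <;> rfl

lemma foldl_pair_append (f : Int → String) (g : Int → Int) :
    ∀ (l : List Int) (c : List String) (v : List Int),
      l.foldl (fun acc i => (acc.1 ++ [f i], acc.2 ++ [g i])) (c, v)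
        = (c ++ l.map f, v ++ l.map g) := by
  intro l
  induction l with
  | nil => simp
  | cons x xs ih => intro c v; simp [List.foldl_cons, ih]

-- single-list overwrite pass over List.range
lemma passC_length {α : Type} (p : Nat → Prop) [DecidablePred p] (c : α) :
    ∀ (M : Nat) (l : List α),
      ((List.range M).foldl (fun l k => if p k then l.set k c else l) l).length = l.length := by
  intro M
  induction M with
  | zero => simp
  | succ m ih =>
    intro l
    rw [List.range_succ, List.foldl_append]
    simp only [List.foldl_cons, List.foldl_nil]
    by_cases h : p m <;> simp [h, ih]

lemma passC_getElem? {α : Type} (p : Nat → Prop) [DecidablePred p] (c : α) :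
    ∀ (M : Nat) (l : List α) (j : Nat),
      ((List.range M).foldl (fun l k => if p k then l.set k c else l) l)[j]?
        = if j < M ∧ p j then (if j < l.length then some c else none) else l[j]? := by
  intro M
  induction M with
  | zero => intro l j; simp
  | succ m ih =>
    intro l j
    rw [List.range_succ, List.foldl_append]
    simp only [List.foldl_cons, List.foldl_nil]
    by_cases hpm : p m
    · rw [if_pos hpm, List.getElem?_set, passC_length, ih]
      by_cases hj : m = j
      · subst hj; simp [hpm]
      · rw [if_neg hj]
        by_cases h1 : j < m ∧ p j
        · have h2 : j < m + 1 ∧ p j := ⟨by omega, h1.2⟩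
          rw [if_pos h1, if_pos h2]
        · rw [if_neg h1, if_neg]
          rintro ⟨a, b⟩
          exact h1 ⟨by omega, b⟩
    · rw [if_neg hpm, ih]
      by_cases h1 : j < m ∧ p j
      · have h2 : j < m + 1 ∧ p j := ⟨by omega, h1.2⟩
        rw [if_pos h1, if_pos h2]
      · rw [if_neg h1, if_neg]
        rintro ⟨a, b⟩
        refine h1 ⟨?_, b⟩
        rcases Nat.lt_succ_iff_lt_or_eq.mp a with h | h
        · exact h
        · exact absurd (h ▸ b) hpm

-- pair pass splits into two independent single-list passes
lemma passPair_split (p : Nat → Prop) [DecidablePred p] (c : String) (v : Int) :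
    ∀ (M : Nat) (cs : List String) (vs : List Int),
      (List.range M).foldl
          (fun acc k => if p k then (acc.1.set k c, acc.2.set k v) else acc) (cs, vs)
        = ((List.range M).foldl (fun l k => if p k then l.set k c else l) cs,
           (List.range M).foldl (fun l k => if p k then l.set k v else l) vs) := by
  intro M
  induction M with
  | zero => simp
  | succ m ih =>
    intro cs vs
    rw [List.range_succ, List.foldl_append, List.foldl_append, List.foldl_append, ih]
    simp only [List.foldl_cons, List.foldl_nil]
    by_cases h : p m <;> simp [h]

lemma bPass_eq (num : Int) (c : String) (v : Int) (row : List Int)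
    (cs : List String) (vs : List Int) :
    bPass num c v row (cs, vs)
      = (List.range (min (row.length : Int) num).toNat).foldl
          (fun acc k => if row.getD k 0 ≠ 0 then (acc.1.set k c, acc.2.set k v) else acc)
          (cs, vs) := by
  unfold bPass
  rw [PySem.List.pyRange_one, List.foldl_map]
  simp

-- characterization of one optional pass, per index
def optPass (num : Int) (c : String) (v : Int) (row? : Option (List Int))
    (acc : List String × List Int) : List String × List Int :=
  match row? with
  | none => acc
  | some row => bPass num c v row acc

def optHit (num : Int) (row? : Option (List Int)) (j : Nat) : Bool :=
  match row? with
  | none => false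
  | some r => decide (j < (min (r.length : Int) num).toNat) && (r.getD j 0 != 0)

lemma optPass_fst_getElem? (num : Int) (c : String) (v : Int) (row? : Option (List Int))
    (acc : List String × List Int) (j : Nat) :
    (optPass num c v row? acc).1[j]?
      = if optHit num row? j then (if j < acc.1.length then some c else none) else acc.1[j]? := by
  obtain ⟨cs, vs⟩ := acc
  rcases row? with _ | row
  · simp [optPass, optHit]
  · simp only [optPass, optHit]
    rw [bPass_eq, passPair_split]
    simp only []
    rw [passC_getElem?]
    by_cases h1 : j < (min ((row.length:Int)) num).toNat ∧ row.getD j 0 ≠ 0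
    · simp [h1.1]
    · have : ¬ (j < (min ((row.length:Int)) num).toNat ∧ (row.getD j 0 != 0) = true) := by
        rintro ⟨a, b⟩; exact h1 ⟨a, by simpa using b⟩
      simp only [if_neg h1, Bool.and_eq_true, decide_eq_true_eq]
      rw [if_neg this]

lemma optPass_snd_getElem? (num : Int) (c : String) (v : Int) (row? : Option (List Int))
    (acc : List String × List Int) (j : Nat) :
    (optPass num c v row? acc).2[j]?
      = if optHit num row? j then (if j < acc.2.length then some v else none) else acc.2[j]? := by
  obtain ⟨cs, vs⟩ := acc
  rcases row? with _ | row
  · simp [optPass, optHit]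
  · simp only [optPass, optHit]
    rw [bPass_eq, passPair_split]
    simp only []
    rw [passC_getElem?]
    by_cases h1 : j < (min ((row.length:Int)) num).toNat ∧ row.getD j 0 ≠ 0
    · simp [h1.1]
    · have : ¬ (j < (min ((row.length:Int)) num).toNat ∧ (row.getD j 0 != 0) = true) := by
        rintro ⟨a, b⟩; exact h1 ⟨a, by simpa using b⟩
      simp only [if_neg h1, Bool.and_eq_true, decide_eq_true_eq]
      rw [if_neg this]

lemma optPass_fst_length (num : Int) (c : String) (v : Int) (row? : Option (List Int))
    (acc : List String × List Int) :
    (optPass num c v row? acc).1.length = acc.1.length := by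
  obtain ⟨cs, vs⟩ := acc
  rcases row? with _ | row
  · simp [optPass]
  · simp only [optPass]
    rw [bPass_eq, passPair_split]
    exact passC_length _ _ _ _

lemma optPass_snd_length (num : Int) (c : String) (v : Int) (row? : Option (List Int))
    (acc : List String × List Int) :
    (optPass num c v row? acc).2.length = acc.2.length := by
  obtain ⟨cs, vs⟩ := acc
  rcases row? with _ | row
  · simp [optPass]
  · simp only [optPass]
    rw [bPass_eq, passPair_split]
    exact passC_length _ _ _ _

lemma optHit_eq_hitB (fr : List (String × List Int)) (num : Int) (nm : String) (j : Nat)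
    (hj : j < num.toNat) :
    optHit num (dget fr nm) j = hitB fr nm j := by
  unfold optHit hitB hitO
  rcases h : dget fr nm with _ | r
  · rfl
  · dsimp only
    have hmin : (min ((r.length : Int)) num).toNat = min r.length num.toNat := by
      rcases le_total ((r.length : Int)) num with h1 | h1
      · rw [min_eq_left h1]; omega
      · rw [min_eq_right h1]; omega
    have hdec : decide (j < (min ((r.length : Int)) num).toNat) = decide (j < r.length) := by
      rw [hmin]
      simp only [decide_eq_decide]
      omega
    rw [hdec]

lemma optHit_ge (num : Int) (row? : Option (List Int)) (j : Nat)
    (hj : ¬ j < num.toNat) : optHit num row? j = false := by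
  rcases row? with _ | r
  · rfl
  · have h : ¬ j < (min (r.length : Int) num).toNat := by omega
    simp [optHit, h]

-- A's result as a map
lemma A_eq_map (fr : List (String × List Int)) (n : Int) (hn : ¬ n ≤ 0) :
    layer_flag_codes_py fr n
      = ((List.range n.toNat).map (selC fr), (List.range n.toNat).map (selV fr)) := by
  unfold layer_flag_codes_py
  rw [if_neg hn]
  show (PySem.List.pyRange 0 n 1).foldl
      (fun acc i => (acc.1 ++ [(aSelect fr i _).1], acc.2 ++ [(aSelect fr i _).2])) ([], [])
    = _
  rw [foldl_pair_append]
  rw [PySem.List.pyRange_one]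
  simp only [List.map_map, Int.sub_zero, List.nil_append]
  simp only [Prod.mk.injEq]
  constructor <;>
  · apply List.map_congr_left
    intro k _
    simp [Function.comp, aSelect_eq]

-- B's result via the four optional passes
lemma B_eq_passes (fr : List (String × List Int)) (n : Int) (hn : ¬ n ≤ 0) :
    layer_flag_codes_py_alt fr n
      = optPass n "FAIL" 4 (dget fr "Fail")
          (optPass n "NS" 3 (dget fr "Settle")
            (optPass n "OV" 2 (dget fr "Overlap")
              (optPass n "FB" 1 (dget fr "Fallback")
                (List.replicate n.toNat "", List.replicate n.toNat 0)))) := by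
  unfold layer_flag_codes_py_alt
  rw [if_neg hn]
  by_cases h : fr = []
  · subst h
    simp [optPass, dget]
  · rw [if_pos h]
    simp only [List.foldl_cons, List.foldl_nil]
    rfl

-- ===== VERDICT (by name: the statement is the Claim_ definition above) =====
theorem layer_flag_codes_py_spec : Claim_equal_layer_flag_codes_py := by
  intro fr n _dom
  unfold Spec_layer_flag_codes_py
  by_cases hn : n ≤ 0
  · unfold layer_flag_codes_py layer_flag_codes_py_alt
    rw [if_pos hn, if_pos hn]
  · rw [A_eq_map fr n hn, B_eq_passes fr n hn]
    set init : List String × List Int :=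
      (List.replicate n.toNat "", List.replicate n.toNat 0) with hinit
    set s1 := optPass n "FB" 1 (dget fr "Fallback") init with hs1
    set s2 := optPass n "OV" 2 (dget fr "Overlap") s1 with hs2
    set s3 := optPass n "NS" 3 (dget fr "Settle") s2 with hs3
    have lc1 : s1.1.length = n.toNat := by rw [hs1, optPass_fst_length, hinit]; simp
    have lc2 : s2.1.length = n.toNat := by rw [hs2, optPass_fst_length, lc1]
    have lc3 : s3.1.length = n.toNat := by rw [hs3, optPass_fst_length, lc2]
    have lv1 : s1.2.length = n.toNat := by rw [hs1, optPass_snd_length, hinit]; simp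
    have lv2 : s2.2.length = n.toNat := by rw [hs2, optPass_snd_length, lv1]
    have lv3 : s3.2.length = n.toNat := by rw [hs3, optPass_snd_length, lv2]
    apply Prod.ext
    · apply List.ext_getElem?
      intro j
      rw [optPass_fst_getElem?, hs3, optPass_fst_getElem?, hs2, optPass_fst_getElem?,
        hs1, optPass_fst_getElem?, lc3, lc2, lc1]
      by_cases hj : j < n.toNat
      · rw [optHit_eq_hitB fr n "Fail" j hj, optHit_eq_hitB fr n "Settle" j hj,
          optHit_eq_hitB fr n "Overlap" j hj, optHit_eq_hitB fr n "Fallback" j hj]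
        simp [hinit, hj, selC]
        split_ifs <;> simp
      · rw [optHit_ge n _ j hj, optHit_ge n _ j hj, optHit_ge n _ j hj, optHit_ge n _ j hj]
        simp [hinit, hj]
    · apply List.ext_getElem?
      intro j
      rw [optPass_snd_getElem?, hs3, optPass_snd_getElem?, hs2, optPass_snd_getElem?,
        hs1, optPass_snd_getElem?, lv3, lv2, lv1]
      by_cases hj : j < n.toNat
      · rw [optHit_eq_hitB fr n "Fail" j hj, optHit_eq_hitB fr n "Settle" j hj,
          optHit_eq_hitB fr n "Overlap" j hj, optHit_eq_hitB fr n "Fallback" j hj]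
        simp [hinit, hj, selV]
        split_ifs <;> simp
      · rw [optHit_ge n _ j hj, optHit_ge n _ j hj, optHit_ge n _ j hj, optHit_ge n _ j hj]
        simp [hinit, hj]
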